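-- pv_equiv track=rewrite | github.com/karan-owalekar/GO_game_bot | players/my_player.py | removeCapturedPieces
-- ===== SOURCE A (Python) =====
-- def removeCapturedPieces(board, opponentNumber):
--     new_board = [row[:] for row in board]
--     to_check = set()
--     for i in range(len(board)):
--         for j in range(len(board[0])):
--             if board[i][j] == opponentNumber:
--                 deltas = ([0, 1], [1, 0], [0, -1], [-1, 0])
--                 # check if any of the surrounding cells is 0
--                 for dx, dy in deltas:
--                     if 0 <= i+dx < len(board) and 0 <= j+dy < len(board[0]) and board[i+dx][j+dy] == 0:
--                         new_board[i][j] = "r"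
--                         to_check.add((i, j))
--                         break
--                 else:
--                     new_board[i][j] = "g"
--                     to_check.add((i, j))
--
--     while to_check:
--         tempBoard = [row[:] for row in new_board]
--         to_check_next = set()
--         for i, j in to_check:
--             if new_board[i][j] == "g":
--                 deltas = ([0, 1], [1, 0], [0, -1], [-1, 0])
--                 # check if any of the surrounding cells is "r"
--                 for dx, dy in deltas:
--                     if 0 <= i+dx < len(board) and 0 <= j+dy < len(board[0]) and new_board[i+dx][j+dy] == "r":
--                         new_board[i][j] = "r"
--                         to_check_next.add((i, j))
--                         break
--                 else:
--                     to_check_next.add((i, j))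
--         if tempBoard == new_board:
--             break
--         to_check = to_check_next
--
--     for i in range(len(board)):
--         for j in range(len(board[0])):
--             if new_board[i][j] == "g":
--                 new_board[i][j] = 0
--             elif new_board[i][j] == "r":
--                 new_board[i][j] = opponentNumber
--
--     return new_board
-- ===== SOURCE B (Python) =====
-- def removeCapturedPieces(board, opponentNumber):
--     # BFS flood fill: find opponent stones connected to a liberty; zero out the rest.
--     n = len(board)
--     m = len(board[0]) if board else 0
--     deltas = ((0, 1), (1, 0), (0, -1), (-1, 0))
--     opp = {(i, j) for i in range(n) for j in range(m)
--            if board[i][j] == opponentNumber}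
--     frontier = [(i, j) for i in range(n) for j in range(m)
--                 if board[i][j] == opponentNumber
--                 and any(0 <= i + dx < n and 0 <= j + dy < m and board[i + dx][j + dy] == 0
--                         for dx, dy in deltas)]
--     alive = set(frontier)
--     while frontier:
--         nxt = []
--         for (i, j) in frontier:
--             for dx, dy in deltas:
--                 p = (i + dx, j + dy)
--                 if p in opp and p not in alive:
--                     alive.add(p)
--                     nxt.append(p)
--         frontier = nxt
--     out = [list(row) for row in board]
--     for (i, j) in opp - alive:
--         out[i][j] = 0
--     return out
-- ===== Notes on version B (the rewrite author's own statement) =====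
-- stated objective: alternative
-- what changed: A marks opponent stones and then repeatedly rescans and copies the whole board until a pass changes nothing; B does one BFS flood fill from the opponent stones that touch a liberty and zeroes the stones the search never reaches.
import Mathlib
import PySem

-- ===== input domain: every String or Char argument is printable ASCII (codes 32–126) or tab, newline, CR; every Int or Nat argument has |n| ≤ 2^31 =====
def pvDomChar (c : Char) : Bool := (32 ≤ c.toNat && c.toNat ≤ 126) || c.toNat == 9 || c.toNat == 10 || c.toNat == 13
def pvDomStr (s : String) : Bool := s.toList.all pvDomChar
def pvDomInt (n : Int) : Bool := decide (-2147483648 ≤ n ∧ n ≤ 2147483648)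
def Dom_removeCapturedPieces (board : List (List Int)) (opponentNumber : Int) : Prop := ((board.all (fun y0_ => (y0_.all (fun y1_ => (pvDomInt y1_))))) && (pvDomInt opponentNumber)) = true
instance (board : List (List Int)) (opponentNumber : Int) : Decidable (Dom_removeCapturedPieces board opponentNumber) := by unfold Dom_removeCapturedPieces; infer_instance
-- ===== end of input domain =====

-- B computes the same result by a different algorithm: one BFS flood fill from the
-- liberty-adjacent opponent stones, instead of A's iterated whole-board re-marking passes.


-- ===== PORT A =====
-- A, transliterated: mark opponent stones "r" (has a liberty) / "g" (none), then repeat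
-- full passes turning "g" stones with an "r" neighbour into "r" until a pass changes
-- nothing, finally map "g" -> 0 and "r" -> opponentNumber.  Python's to_check sets hold
-- distinct grid coordinates, ported as lists in iteration order; the bounded recursion
-- pvWhileA (fuel n*m+1) runs Python's while-loop, which ends after at most n*m passes.

inductive PvCell where
  | v : Int → PvCell
  | r : PvCell
  | g : PvCell
deriving DecidableEq

/-- cell read `b[p0][p1]` (used only at non-negative, in-range coordinates). -/
def pvGet {α : Type} (d : α) (b : List (List α)) (p : Int × Int) : α :=
  (b.getD p.1.toNat []).getD p.2.toNat d

/-- cell write `b[p0][p1] = c` (used only at non-negative, in-range coordinates). -/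
def pvSetP {α : Type} (b : List (List α)) (p : Int × Int) (c : α) : List (List α) :=
  b.set p.1.toNat ((b.getD p.1.toNat []).set p.2.toNat c)

def pvDeltas : List (Int × Int) := [(0, 1), (1, 0), (0, -1), (-1, 0)]

def pvAdd (p d : Int × Int) : Int × Int := (p.1 + d.1, p.2 + d.2)

def pvInb (n m : Nat) (p : Int × Int) : Bool :=
  decide (0 ≤ p.1 ∧ p.1 < (n : Int) ∧ 0 ≤ p.2 ∧ p.2 < (m : Int))

/-- `for i in range(n): for j in range(m):` -/
def pvGrid (n m : Nat) : List (Int × Int) :=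
  (List.range n ×ˢ List.range m).map (fun ij => ((ij.1 : Int), (ij.2 : Int)))

/-- `any(0 <= i+dx < n and 0 <= j+dy < m and board[i+dx][j+dy] == 0 for dx, dy in deltas)` -/
def pvHasLib (board : List (List Int)) (n m : Nat) (p : Int × Int) : Bool :=
  pvDeltas.any (fun d => pvInb n m (pvAdd p d) && (pvGet 0 board (pvAdd p d) == 0))

/-- the same test against "r" marks on the working board -/
def pvHasR (n m : Nat) (nb : List (List PvCell)) (p : Int × Int) : Bool :=
  pvDeltas.any (fun d => pvInb n m (pvAdd p d) && (pvGet (PvCell.v 0) nb (pvAdd p d) == PvCell.r))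

/-- first double loop: mark "r"/"g", collect to_check -/
def pvPhase1 (board : List (List Int)) (opp : Int) (n m : Nat) :
    List (List PvCell) × List (Int × Int) :=
  (pvGrid n m).foldl
    (fun st p =>
      if pvGet 0 board p == opp then
        if pvHasLib board n m p then (pvSetP st.1 p PvCell.r, st.2 ++ [p])
        else (pvSetP st.1 p PvCell.g, st.2 ++ [p])
      else st)
    (board.map (fun row => row.map PvCell.v), [])

/-- one pass of the while-loop body over to_check, building to_check_next -/
def pvRoundA (n m : Nat) (nb : List (List PvCell)) (tc : List (Int × Int)) :
    List (List PvCell) × List (Int × Int) :=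
  tc.foldl
    (fun st p =>
      if pvGet (PvCell.v 0) st.1 p == PvCell.g then
        if pvHasR n m st.1 p then (pvSetP st.1 p PvCell.r, st.2 ++ [p])
        else (st.1, st.2 ++ [p])
      else st)
    (nb, [])

/-- `while to_check:` … `if tempBoard == new_board: break` -/
def pvWhileA (n m : Nat) : Nat → List (List PvCell) → List (Int × Int) → List (List PvCell)
  | 0, nb, _ => nb
  | fuel + 1, nb, tc =>
    if tc.isEmpty then nb
    else
      let st := pvRoundA n m nb tc
      if nb = st.1 then st.1 else pvWhileA n m fuel st.1 st.2

/-- final double loop: "g" -> 0, "r" -> opponentNumber -/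
def pvPhase3 (opp : Int) (n m : Nat) (nb : List (List PvCell)) : List (List PvCell) :=
  (pvGrid n m).foldl
    (fun nb p =>
      if pvGet (PvCell.v 0) nb p == PvCell.g then pvSetP nb p (PvCell.v 0)
      else if pvGet (PvCell.v 0) nb p == PvCell.r then pvSetP nb p (PvCell.v opp)
      else nb)
    nb

def removeCapturedPieces (board : List (List Int)) (opponentNumber : Int) : List (List Int) :=
  let n := board.length
  let m := (board.headD []).length
  let st := pvPhase1 board opponentNumber n m
  let nbF := pvWhileA n m (n * m + 1) st.1 st.2
  -- the returned new_board (all its cells are ints again; the default 0 is never hit)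
  (pvPhase3 opponentNumber n m nbF).map
    (fun row => row.map (fun c => match c with | PvCell.v k => k | _ => 0))

-- ===== PORT B =====
-- B: BFS flood fill.  Start from opponent stones with a direct liberty and expand
-- through adjacent opponent stones (`alive`); zero out the opponent stones never
-- reached.  The fuel `|opp| + 2` bounds Python's while-loop, whose frontier shrinks
-- the unvisited set every round.

/-- one `while frontier:` round: scan frontier × deltas, growing (alive, nxt) -/
def pvRoundB (oppL : List (Int × Int)) (st : List (Int × Int) × List (Int × Int))
    (ps : List (Int × Int)) : List (Int × Int) × List (Int × Int) :=
  ps.foldl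
    (fun st p =>
      pvDeltas.foldl
        (fun st d =>
          let q := pvAdd p d
          if oppL.contains q && !st.1.contains q then (st.1 ++ [q], st.2 ++ [q])
          else st)
        st)
    st

def pvBfs (oppL : List (Int × Int)) : Nat → List (Int × Int) → List (Int × Int) → List (Int × Int)
  | 0, alive, _ => alive
  | fuel + 1, alive, frontier =>
    if frontier.isEmpty then alive
    else
      let st := pvRoundB oppL (alive, []) frontier
      pvBfs oppL fuel st.1 st.2

/-- `opp = {(i,j) | board[i][j] == opponentNumber}` (distinct coordinates, as a list) -/
def pvOppL (board : List (List Int)) (opp : Int) (n m : Nat) : List (Int × Int) :=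
  (pvGrid n m).filter (fun p => pvGet 0 board p == opp)

/-- the initial frontier: opponent stones with a direct liberty -/
def pvFrontier0 (board : List (List Int)) (opp : Int) (n m : Nat) : List (Int × Int) :=
  (pvGrid n m).filter (fun p => pvGet 0 board p == opp && pvHasLib board n m p)

def removeCapturedPieces_alt (board : List (List Int)) (opponentNumber : Int) : List (List Int) :=
  let n := board.length
  let m := (board.headD []).length
  let oppL := pvOppL board opponentNumber n m
  let frontier := pvFrontier0 board opponentNumber n m
  let alive := pvBfs oppL (oppL.length + 2) frontier frontier
  -- `out = [list(row) for row in board]; for p in opp - alive: out[p] = 0`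
  (oppL.filter (fun p => !alive.contains p)).foldl
    (fun out p => pvSetP out p 0)
    (board.map (fun row => row))

-- ===== PRECONDITION & SPEC =====
-- Pre_ excludes exactly the inputs where A raises IndexError: ragged boards with a
-- row shorter than the first row (the board[i][j] reads with j < len(board[0])).
def Pre_removeCapturedPieces (board : List (List Int)) (opponentNumber : Int) : Prop :=
  ∀ row ∈ board, (board.headD []).length ≤ row.length
instance (board : List (List Int)) (opponentNumber : Int) :
    Decidable (Pre_removeCapturedPieces board opponentNumber) := by
  unfold Pre_removeCapturedPieces; infer_instance

def pvWitness_removeCapturedPieces : List (List Int) × Int := ([[1, 0], [2, 1]], 1)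

def Spec_removeCapturedPieces (board : List (List Int)) (opponentNumber : Int) (out : List (List Int)) : Prop := out = removeCapturedPieces_alt board opponentNumber
instance (board : List (List Int)) (opponentNumber : Int) (out : List (List Int)) : Decidable (Spec_removeCapturedPieces board opponentNumber out) := by unfold Spec_removeCapturedPieces; infer_instance

-- ===== CLAIM (what is proved, stated in full; the proofs are below) =====
def Claim_equal_removeCapturedPieces : Prop := ∀ (board : List (List Int)) (opponentNumber : Int), Dom_removeCapturedPieces board opponentNumber → Pre_removeCapturedPieces board opponentNumber → Spec_removeCapturedPieces board opponentNumber (removeCapturedPieces board opponentNumber)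


-- ===== LEMMAS AND PROOFS =====

-- n, m describe the board: n rows, each row at least m wide (from Pre_).
def pvOk (board : List (List Int)) (n m : Nat) : Prop :=
  n = board.length ∧ ∀ i : Nat, i < n → m ≤ (board.getD i []).length

-- nb has the same row count and row lengths as board.
def pvShp {α : Type} (board : List (List Int)) (nb : List (List α)) : Prop :=
  nb.length = board.length ∧ ∀ i : Nat, (nb.getD i []).length = (board.getD i []).length

-- p is an in-bounds opponent stone.
def pvOpp (board : List (List Int)) (opp : Int) (n m : Nat) (p : Int × Int) : Prop :=
  pvInb n m p = true ∧ pvGet 0 board p = opp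

-- opponent stones connected (through opponent stones) to a stone with a liberty
inductive pvReach (board : List (List Int)) (opp : Int) (n m : Nat) : (Int × Int) → Prop where
  | lib : ∀ p, pvOpp board opp n m p → pvHasLib board n m p = true →
      pvReach board opp n m p
  | step : ∀ p q d, pvReach board opp n m q → pvOpp board opp n m p → d ∈ pvDeltas →
      pvAdd p d = q → pvReach board opp n m p

theorem pvReach_opp {board : List (List Int)} {opp : Int} {n m : Nat} {p : Int × Int}
    (h : pvReach board opp n m p) : pvOpp board opp n m p := by
  cases h with
  | lib _ ho _ => exact ho
  | step _ _ _ _ ho _ _ => exact ho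

theorem pvInb_bounds {n m : Nat} {p : Int × Int} (h : pvInb n m p = true) :
    0 ≤ p.1 ∧ p.1 < (n : Int) ∧ 0 ≤ p.2 ∧ p.2 < (m : Int) := by
  simpa [pvInb] using h

theorem pvGetD_set_self {α : Type} (l : List α) (i : Nat) (a d : α) (h : i < l.length) :
    (l.set i a).getD i d = a := by
  simp [List.getD_eq_getElem?_getD, h]

theorem pvGetD_set_ne {α : Type} (l : List α) (i j : Nat) (a d : α) (h : i ≠ j) :
    (l.set i a).getD j d = l.getD j d := by
  simp [List.getD_eq_getElem?_getD, List.getElem?_set_ne h]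

theorem pvGet_setP_self {α : Type} (d : α) {board : List (List Int)} {n m : Nat}
    {nb : List (List α)} {p : Int × Int} (c : α)
    (hOk : pvOk board n m) (hs : pvShp board nb) (hp : pvInb n m p = true) :
    pvGet d (pvSetP nb p c) p = c := by
  obtain ⟨h1, h2, h3, h4⟩ := pvInb_bounds hp
  have hi : p.1.toNat < nb.length := by rw [hs.1, ← hOk.1]; omega
  have hj : p.2.toNat < (nb.getD p.1.toNat []).length := by
    rw [hs.2]
    have := hOk.2 p.1.toNat (by omega)
    omega
  simp only [pvGet, pvSetP]
  rw [pvGetD_set_self _ _ _ _ hi, pvGetD_set_self _ _ _ _ hj]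

theorem pvGet_setP_ne {α : Type} (d : α) {board : List (List Int)} {n m : Nat}
    {nb : List (List α)} {p q : Int × Int} (c : α)
    (hOk : pvOk board n m) (hs : pvShp board nb) (hp : pvInb n m p = true)
    (hq1 : 0 ≤ q.1) (hq2 : 0 ≤ q.2) (hne : q ≠ p) :
    pvGet d (pvSetP nb p c) q = pvGet d nb q := by
  obtain ⟨h1, h2, h3, h4⟩ := pvInb_bounds hp
  have hi : p.1.toNat < nb.length := by rw [hs.1, ← hOk.1]; omega
  by_cases hrow : q.1.toNat = p.1.toNat
  · have hq1e : q.1 = p.1 := by omega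
    have hcol : q.2.toNat ≠ p.2.toNat := by
      intro hc
      exact hne (Prod.ext hq1e (by omega))
    simp only [pvGet, pvSetP, hrow]
    rw [pvGetD_set_self _ _ _ _ hi, pvGetD_set_ne _ _ _ _ _ (fun h => hcol h.symm)]
  · simp only [pvGet, pvSetP]
    rw [pvGetD_set_ne _ _ _ _ _ (fun h => hrow h.symm)]

theorem pvShp_setP {α : Type} {board : List (List Int)} {nb : List (List α)}
    (p : Int × Int) (c : α) (hs : pvShp board nb) :
    pvShp board (pvSetP nb p c) := by
  constructor
  · simp [pvSetP, hs.1]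
  · intro i
    by_cases hrow : i = p.1.toNat
    · by_cases hi : p.1.toNat < nb.length
      · rw [hrow, pvSetP, pvGetD_set_self _ _ _ _ hi, List.length_set]
        rw [hrow] at *; exact hs.2 p.1.toNat
      · have : nb.set p.1.toNat ((nb.getD p.1.toNat []).set p.2.toNat c) = nb := by
          apply List.set_eq_of_length_le; omega
        rw [pvSetP, this]; exact hs.2 i
    · rw [pvSetP, pvGetD_set_ne _ _ _ _ _ (fun h => hrow h.symm)]; exact hs.2 i

theorem pvShp_ext {α : Type} (d : α) {board : List (List Int)} {nb nb' : List (List α)}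
    (hs1 : pvShp board nb) (hs2 : pvShp board nb')
    (h : ∀ q : Int × Int, 0 ≤ q.1 → 0 ≤ q.2 → pvGet d nb q = pvGet d nb' q) : nb = nb' := by
  apply List.ext_getElem
  · rw [hs1.1, hs2.1]
  · intro i hi hi'
    apply List.ext_getElem
    · have e1 : nb[i] = nb.getD i [] := by
        rw [List.getD_eq_getElem?_getD, List.getElem?_eq_getElem hi]; rfl
      have e2 : nb'[i] = nb'.getD i [] := by
        rw [List.getD_eq_getElem?_getD, List.getElem?_eq_getElem hi']; rfl
      rw [e1, e2, hs1.2, hs2.2]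
    · intro j hj hj'
      have := h ((i : Int), (j : Int)) (by positivity) (by positivity)
      simp only [pvGet, Int.toNat_natCast] at this
      have e1 : nb.getD i [] = nb[i] := by
        rw [List.getD_eq_getElem?_getD, List.getElem?_eq_getElem hi]; rfl
      have e2 : nb'.getD i [] = nb'[i] := by
        rw [List.getD_eq_getElem?_getD, List.getElem?_eq_getElem hi']; rfl
      rw [e1, e2] at this
      rw [List.getD_eq_getElem?_getD, List.getElem?_eq_getElem hj] at this
      rw [List.getD_eq_getElem?_getD, List.getElem?_eq_getElem hj'] at this
      exact this

theorem pvGrid_mem {n m : Nat} {p : Int × Int} : p ∈ pvGrid n m ↔ pvInb n m p = true := by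
  constructor
  · intro h
    simp only [pvGrid, List.mem_map] at h
    obtain ⟨⟨i, j⟩, hij, rfl⟩ := h
    rw [List.mem_product] at hij
    simp only [List.mem_range] at hij
    simp [pvInb]
    omega
  · intro h
    obtain ⟨h1, h2, h3, h4⟩ := pvInb_bounds h
    simp only [pvGrid, List.mem_map]
    refine ⟨(p.1.toNat, p.2.toNat), ?_, ?_⟩
    · rw [List.mem_product]
      simp only [List.mem_range]
      omega
    · apply Prod.ext <;> simp <;> omega

theorem pvGrid_nodup (n m : Nat) : (pvGrid n m).Nodup := by
  apply List.Nodup.map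
  · intro a b hab
    apply Prod.ext
    · have := congrArg Prod.fst hab
      simpa using this
    · have := congrArg Prod.snd hab
      simpa using this
  · exact (List.nodup_range).product (List.nodup_range)

theorem pvGrid_length (n m : Nat) : (pvGrid n m).length = n * m := by
  simp only [pvGrid, List.length_map, List.length_product, List.length_range]

theorem pvDeltas_symm {p : Int × Int} {d : Int × Int} (h : d ∈ pvDeltas) :
    ∃ d' ∈ pvDeltas, pvAdd (pvAdd p d) d' = p := by
  simp only [pvDeltas, List.mem_cons, List.not_mem_nil, or_false] at h
  rcases h with rfl | rfl | rfl | rfl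
  · exact ⟨(0, -1), by simp [pvDeltas], by simp [pvAdd]⟩
  · exact ⟨(-1, 0), by simp [pvDeltas], by simp [pvAdd]⟩
  · exact ⟨(0, 1), by simp [pvDeltas], by simp [pvAdd]⟩
  · exact ⟨(1, 0), by simp [pvDeltas], by simp [pvAdd]⟩

-- generic "each step updates only its own cell" fold
def pvUpd {α : Type} (d : α) (f : (Int × Int) → α → Option α) (nb : List (List α))
    (p : Int × Int) : List (List α) :=
  match f p (pvGet d nb p) with
  | some c => pvSetP nb p c
  | none => nb

theorem pvUpd_foldl_shp {α : Type} (d : α) (f : (Int × Int) → α → Option α)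
    {board : List (List Int)} (ps : List (Int × Int)) (nb : List (List α))
    (hs : pvShp board nb) :
    pvShp board (ps.foldl (pvUpd d f) nb) := by
  induction ps generalizing nb with
  | nil => exact hs
  | cons p ps ih =>
    apply ih
    simp only [pvUpd]
    cases f p (pvGet d nb p) with
    | some c => exact pvShp_setP p c hs
    | none => exact hs

theorem pvUpd_foldl_get {α : Type} (d : α) (f : (Int × Int) → α → Option α)
    {board : List (List Int)} {n m : Nat} (ps : List (Int × Int)) (nb : List (List α))
    (hOk : pvOk board n m) (hs : pvShp board nb) (hnd : ps.Nodup)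
    (hsub : ∀ p ∈ ps, pvInb n m p = true)
    (q : Int × Int) (hq1 : 0 ≤ q.1) (hq2 : 0 ≤ q.2) :
    pvGet d (ps.foldl (pvUpd d f) nb) q =
      if q ∈ ps then (f q (pvGet d nb q)).getD (pvGet d nb q) else pvGet d nb q := by
  induction ps generalizing nb with
  | nil => simp
  | cons p ps ih =>
    have hp := hsub p (by simp)
    have hs1 : pvShp board (pvUpd d f nb p) := by
      simp only [pvUpd]
      cases f p (pvGet d nb p) with
      | some c => exact pvShp_setP p c hs
      | none => exact hs
    by_cases hqp : q = p
    · subst hqp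
      have hq_not : q ∉ ps := by
        intro hmem; exact (List.nodup_cons.mp hnd).1 hmem
      rw [List.foldl_cons, ih (pvUpd d f nb q) hs1 (List.nodup_cons.mp hnd).2
        (fun x hx => hsub x (by simp [hx])) , if_neg hq_not, if_pos (by simp)]
      simp only [pvUpd]
      cases hf : f q (pvGet d nb q) with
      | some c =>
        simp only [Option.getD_some]
        exact pvGet_setP_self d c hOk hs hp
      | none => simp
    · have hkeep : pvGet d (pvUpd d f nb p) q = pvGet d nb q := by
        simp only [pvUpd]
        cases f p (pvGet d nb p) with
        | some c => exact pvGet_setP_ne d c hOk hs hp hq1 hq2 hqp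
        | none => rfl
      rw [List.foldl_cons, ih (pvUpd d f nb p) hs1 (List.nodup_cons.mp hnd).2
        (fun x hx => hsub x (by simp [hx]))]
      simp only [hkeep]
      by_cases hmem : q ∈ ps
      · rw [if_pos hmem, if_pos (by simp [hmem])]
      · rw [if_neg hmem, if_neg (by simp [hqp, hmem])]

def pvF1 (board : List (List Int)) (opp : Int) (n m : Nat) (p : Int × Int) (_ : PvCell) :
    Option PvCell :=
  if pvGet 0 board p == opp then some (if pvHasLib board n m p then PvCell.r else PvCell.g)
  else none

def pvInit (board : List (List Int)) : List (List PvCell) :=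
  board.map (fun row => row.map PvCell.v)

theorem pvInit_shp (board : List (List Int)) : pvShp board (pvInit board) := by
  constructor
  · simp [pvInit]
  · intro i
    simp only [pvInit, List.getD_eq_getElem?_getD, List.getElem?_map]
    cases board[i]? <;> simp

theorem pvInit_get (board : List (List Int)) (q : Int × Int) :
    pvGet (PvCell.v 0) (pvInit board) q = PvCell.v (pvGet 0 board q) := by
  simp only [pvGet, pvInit, List.getD_eq_getElem?_getD, List.getElem?_map]
  cases hrow : board[q.1.toNat]? with
  | none => simp
  | some row =>
    simp only [Option.map_some, Option.getD_some, List.getElem?_map]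
    cases hj : row[q.2.toNat]? <;> simp

theorem pvPhase1_eq (board : List (List Int)) (opp : Int) (n m : Nat) :
    pvPhase1 board opp n m =
      ((pvGrid n m).foldl (pvUpd (PvCell.v 0) (pvF1 board opp n m)) (pvInit board),
       pvOppL board opp n m) := by
  unfold pvPhase1
  have hfun :
      (fun (st : List (List PvCell) × List (Int × Int)) p =>
        if pvGet 0 board p == opp then
          if pvHasLib board n m p then (pvSetP st.1 p PvCell.r, st.2 ++ [p])
          else (pvSetP st.1 p PvCell.g, st.2 ++ [p])
        else st)
      = (fun (st : List (List PvCell) × List (Int × Int)) p =>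
          (pvUpd (PvCell.v 0) (pvF1 board opp n m) st.1 p,
           if pvGet 0 board p == opp then st.2 ++ [p] else st.2)) := by
    funext st p
    simp only [pvUpd, pvF1]
    by_cases h : pvGet 0 board p == opp <;> by_cases h2 : pvHasLib board n m p <;> simp [h, h2]
  have h2 := PySem.List.foldl_prod_mk (pvUpd (PvCell.v 0) (pvF1 board opp n m))
    (fun acc x => if pvGet 0 board x == opp then acc ++ [x] else acc)
    (pvGrid n m) (pvInit board) ([] : List (Int × Int))
  simp only [] at h2
  rw [hfun]
  rw [show (List.map (fun row => List.map PvCell.v row) board) = pvInit board from rfl]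
  rw [h2]
  have h3 := PySem.List.foldl_append_if (fun x => pvGet 0 board x == opp)
    (fun x : Int × Int => x) (pvGrid n m) ([] : List (Int × Int))
  simp only [] at h3
  rw [h3]
  simp [pvOppL]

theorem pvPhase1_shp (board : List (List Int)) (opp : Int) (n m : Nat) :
    pvShp board (pvPhase1 board opp n m).1 := by
  rw [pvPhase1_eq]
  exact pvUpd_foldl_shp _ _ _ _ (pvInit_shp board)

theorem pvPhase1_get (board : List (List Int)) (opp : Int) (n m : Nat)
    (hOk : pvOk board n m) (q : Int × Int) (hq1 : 0 ≤ q.1) (hq2 : 0 ≤ q.2) :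
    pvGet (PvCell.v 0) (pvPhase1 board opp n m).1 q =
      if pvInb n m q = true ∧ pvGet 0 board q = opp then
        (if pvHasLib board n m q = true then PvCell.r else PvCell.g)
      else PvCell.v (pvGet 0 board q) := by
  rw [pvPhase1_eq]
  rw [pvUpd_foldl_get (PvCell.v 0) _ _ _ hOk (pvInit_shp board) (pvGrid_nodup n m)
    (fun p hp => pvGrid_mem.mp hp) q hq1 hq2]
  by_cases hin : pvInb n m q = true
  · rw [if_pos (pvGrid_mem.mpr hin)]
    by_cases hc : pvGet 0 board q = opp
    · rw [if_pos ⟨hin, hc⟩]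
      simp [pvF1, hc]
    · rw [if_neg (fun h => hc h.2)]
      simp [pvF1, beq_iff_eq, hc, pvInit_get]
  · rw [if_neg (fun h => hin (pvGrid_mem.mp h)), if_neg (fun h => hin h.1)]
    exact pvInit_get board q

theorem pvPhase1_tc (board : List (List Int)) (opp : Int) (n m : Nat) :
    (pvPhase1 board opp n m).2 = pvOppL board opp n m := by
  rw [pvPhase1_eq]

def pvF3 (opp : Int) (_ : Int × Int) (x : PvCell) : Option PvCell :=
  if x == PvCell.g then some (PvCell.v 0)
  else if x == PvCell.r then some (PvCell.v opp) else none

theorem pvPhase3_eq (opp : Int) (n m : Nat) (nb : List (List PvCell)) :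
    pvPhase3 opp n m nb = (pvGrid n m).foldl (pvUpd (PvCell.v 0) (pvF3 opp)) nb := by
  unfold pvPhase3
  have hfun :
      (fun (nb : List (List PvCell)) p =>
        if pvGet (PvCell.v 0) nb p == PvCell.g then pvSetP nb p (PvCell.v 0)
        else if pvGet (PvCell.v 0) nb p == PvCell.r then pvSetP nb p (PvCell.v opp)
        else nb)
      = pvUpd (PvCell.v 0) (pvF3 opp) := by
    funext nb p
    simp only [pvUpd, pvF3]
    by_cases h1 : pvGet (PvCell.v 0) nb p == PvCell.g <;>
      by_cases h2 : pvGet (PvCell.v 0) nb p == PvCell.r <;> simp [h1, h2]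
  rw [hfun]

theorem pvPhase3_shp (board : List (List Int)) (opp : Int) (n m : Nat)
    (nb : List (List PvCell)) (hs : pvShp board nb) :
    pvShp board (pvPhase3 opp n m nb) := by
  rw [pvPhase3_eq]
  exact pvUpd_foldl_shp _ _ _ _ hs

theorem pvPhase3_get (board : List (List Int)) (opp : Int) (n m : Nat)
    (nb : List (List PvCell)) (hOk : pvOk board n m) (hs : pvShp board nb)
    (q : Int × Int) (hq1 : 0 ≤ q.1) (hq2 : 0 ≤ q.2) :
    pvGet (PvCell.v 0) (pvPhase3 opp n m nb) q =
      if pvInb n m q = true then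
        (match pvGet (PvCell.v 0) nb q with
          | PvCell.g => PvCell.v 0
          | PvCell.r => PvCell.v opp
          | PvCell.v k => PvCell.v k)
      else pvGet (PvCell.v 0) nb q := by
  rw [pvPhase3_eq]
  rw [pvUpd_foldl_get (PvCell.v 0) _ _ _ hOk hs (pvGrid_nodup n m)
    (fun p hp => pvGrid_mem.mp hp) q hq1 hq2]
  by_cases hin : pvInb n m q = true
  · rw [if_pos (pvGrid_mem.mpr hin), if_pos hin]
    cases pvGet (PvCell.v 0) nb q <;> simp [pvF3]
  · rw [if_neg (fun h => hin (pvGrid_mem.mp h)), if_neg hin]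

def pvStepA (n m : Nat) (st : List (List PvCell) × List (Int × Int)) (p : Int × Int) :
    List (List PvCell) × List (Int × Int) :=
  if pvGet (PvCell.v 0) st.1 p == PvCell.g then
    if pvHasR n m st.1 p then (pvSetP st.1 p PvCell.r, st.2 ++ [p])
    else (st.1, st.2 ++ [p])
  else st

theorem pvRoundA_eq (n m : Nat) (nb : List (List PvCell)) (tc : List (Int × Int)) :
    pvRoundA n m nb tc = tc.foldl (pvStepA n m) (nb, []) := rfl

def pvMono (nb nb' : List (List PvCell)) : Prop :=
  ∀ q : Int × Int, 0 ≤ q.1 → 0 ≤ q.2 →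
    pvGet (PvCell.v 0) nb' q = pvGet (PvCell.v 0) nb q ∨
    (pvGet (PvCell.v 0) nb q = PvCell.g ∧ pvGet (PvCell.v 0) nb' q = PvCell.r)

theorem pvMono_refl (nb : List (List PvCell)) : pvMono nb nb := fun _ _ _ => Or.inl rfl

theorem pvMono_trans {a b c : List (List PvCell)} (h1 : pvMono a b) (h2 : pvMono b c) :
    pvMono a c := by
  intro q hq1 hq2
  rcases h2 q hq1 hq2 with he | ⟨hg, hr⟩
  · rw [he]; exact h1 q hq1 hq2
  · rcases h1 q hq1 hq2 with he' | ⟨hg', hr'⟩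
    · right; exact ⟨he' ▸ hg, hr⟩
    · right; exact ⟨hg', hr⟩

def pvStepRel (tc : List (Int × Int)) (nb nb' : List (List PvCell)) : Prop :=
  ∀ q : Int × Int, 0 ≤ q.1 → 0 ≤ q.2 →
    pvGet (PvCell.v 0) nb' q = pvGet (PvCell.v 0) nb q ∨
    (q ∈ tc ∧ pvGet (PvCell.v 0) nb q = PvCell.g ∧ pvGet (PvCell.v 0) nb' q = PvCell.r)

theorem pvStepRel_mono {tc : List (Int × Int)} {nb nb' : List (List PvCell)}
    (h : pvStepRel tc nb nb') : pvMono nb nb' := by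
  intro q hq1 hq2
  rcases h q hq1 hq2 with he | ⟨_, hg, hr⟩
  · exact Or.inl he
  · exact Or.inr ⟨hg, hr⟩

theorem pvStepRel_weaken {tc tc' : List (Int × Int)} {nb nb' : List (List PvCell)}
    (hsub : ∀ x ∈ tc, x ∈ tc') (h : pvStepRel tc nb nb') : pvStepRel tc' nb nb' := by
  intro q hq1 hq2
  rcases h q hq1 hq2 with he | ⟨hm, hg, hr⟩
  · exact Or.inl he
  · exact Or.inr ⟨hsub q hm, hg, hr⟩

def pvMInv (board : List (List Int)) (opp : Int) (n m : Nat) (nb : List (List PvCell)) : Prop :=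
  ∀ p : Int × Int, pvInb n m p = true →
    if pvGet 0 board p = opp then
      (pvGet (PvCell.v 0) nb p = PvCell.r ∨ pvGet (PvCell.v 0) nb p = PvCell.g)
    else pvGet (PvCell.v 0) nb p = PvCell.v (pvGet 0 board p)

theorem pvMInv_mono {board : List (List Int)} {opp : Int} {n m : Nat}
    {nb nb' : List (List PvCell)} (h : pvMInv board opp n m nb) (hm : pvMono nb nb') :
    pvMInv board opp n m nb' := by
  intro p hp
  have hthis := h p hp
  have hnn := pvInb_bounds hp
  rcases hm p hnn.1 hnn.2.2.1 with he | ⟨hg, hr⟩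
  · rw [he]; exact hthis
  · by_cases hc : pvGet 0 board p = opp
    · rw [if_pos hc]; left; exact hr
    · rw [if_neg hc] at hthis ⊢
      rw [hthis] at hg
      simp at hg

def pvRS (board : List (List Int)) (opp : Int) (n m : Nat) (nb : List (List PvCell)) : Prop :=
  ∀ p : Int × Int, pvInb n m p = true → pvGet (PvCell.v 0) nb p = PvCell.r →
    pvReach board opp n m p

theorem pvHasR_iff {n m : Nat} {nb : List (List PvCell)} {p : Int × Int} :
    pvHasR n m nb p = true ↔
      ∃ d ∈ pvDeltas, pvInb n m (pvAdd p d) = true ∧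
        pvGet (PvCell.v 0) nb (pvAdd p d) = PvCell.r := by
  simp [pvHasR, List.any_eq_true, Bool.and_eq_true]

theorem pvMono_setR {board : List (List Int)} {n m : Nat} {nb : List (List PvCell)}
    {p : Int × Int} (hOk : pvOk board n m) (hs : pvShp board nb) (hp : pvInb n m p = true)
    (hg : pvGet (PvCell.v 0) nb p = PvCell.g) :
    pvMono nb (pvSetP nb p PvCell.r) := by
  intro q hq1 hq2
  by_cases hqp : q = p
  · subst hqp
    right
    exact ⟨hg, pvGet_setP_self _ _ hOk hs hp⟩
  · left
    exact pvGet_setP_ne _ _ hOk hs hp hq1 hq2 hqp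

theorem pvRoundA_aux1 {board : List (List Int)} {n m : Nat} :
    ∀ (tc : List (Int × Int)) (nb : List (List PvCell)) (acc : List (Int × Int)),
    pvOk board n m → pvShp board nb → (∀ p ∈ tc, pvInb n m p = true) →
    pvShp board (tc.foldl (pvStepA n m) (nb, acc)).1 ∧
      pvStepRel tc nb (tc.foldl (pvStepA n m) (nb, acc)).1 := by
  intro tc
  induction tc with
  | nil =>
    intro nb acc hOk hs _
    exact ⟨hs, fun _ _ _ => Or.inl rfl⟩
  | cons p tc ih =>
    intro nb acc hOk hs hsub
    have hp := hsub p (by simp)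
    have hpn := pvInb_bounds hp
    have hsub' : ∀ x ∈ tc, pvInb n m x = true := fun x hx => hsub x (by simp [hx])
    simp only [List.foldl_cons]
    by_cases hg : pvGet (PvCell.v 0) nb p = PvCell.g
    · by_cases hr : pvHasR n m nb p = true
      · have hstep : pvStepA n m (nb, acc) p = (pvSetP nb p PvCell.r, acc ++ [p]) := by
          simp [pvStepA, hg, hr]
        rw [hstep]
        obtain ⟨hs', hrel⟩ := ih (pvSetP nb p PvCell.r) (acc ++ [p]) hOk
          (pvShp_setP p PvCell.r hs) hsub'
        refine ⟨hs', ?_⟩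
        intro q hq1 hq2
        by_cases hqp : q = p
        · subst hqp
          have hset : pvGet (PvCell.v 0) (pvSetP nb q PvCell.r) q = PvCell.r :=
            pvGet_setP_self _ _ hOk hs hp
          rcases hrel q hq1 hq2 with he | ⟨_, hgg, _⟩
          · right; exact ⟨by simp, hg, by rw [he, hset]⟩
          · rw [hset] at hgg; simp at hgg
        · have hkeep : pvGet (PvCell.v 0) (pvSetP nb p PvCell.r) q = pvGet (PvCell.v 0) nb q :=
            pvGet_setP_ne _ _ hOk hs hp hq1 hq2 hqp
          rcases hrel q hq1 hq2 with he | ⟨hm, hgg, hrr⟩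
          · left; rw [he, hkeep]
          · right; exact ⟨by simp [hm], by rw [← hkeep]; exact hgg, hrr⟩
      · have hstep : pvStepA n m (nb, acc) p = (nb, acc ++ [p]) := by
          simp [pvStepA, hg, hr]
        rw [hstep]
        obtain ⟨hs', hrel⟩ := ih nb (acc ++ [p]) hOk hs hsub'
        exact ⟨hs', pvStepRel_weaken (fun x hx => by simp [hx]) hrel⟩
    · have hstep : pvStepA n m (nb, acc) p = (nb, acc) := by
        simp [pvStepA, hg]
      rw [hstep]
      obtain ⟨hs', hrel⟩ := ih nb acc hOk hs hsub'
      exact ⟨hs', pvStepRel_weaken (fun x hx => by simp [hx]) hrel⟩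

theorem pvRoundA_aux2 {board : List (List Int)} {opp : Int} {n m : Nat} :
    ∀ (tc : List (Int × Int)) (nb : List (List PvCell)) (acc : List (Int × Int)),
    pvOk board n m → pvShp board nb → (∀ p ∈ tc, pvInb n m p = true) →
    pvMInv board opp n m nb → pvRS board opp n m nb →
    pvRS board opp n m (tc.foldl (pvStepA n m) (nb, acc)).1 := by
  intro tc
  induction tc with
  | nil => intro nb acc _ _ _ _ hrs; exact hrs
  | cons p tc ih =>
    intro nb acc hOk hs hsub hmi hrs
    have hp := hsub p (by simp)
    have hsub' : ∀ x ∈ tc, pvInb n m x = true := fun x hx => hsub x (by simp [hx])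
    simp only [List.foldl_cons]
    by_cases hg : pvGet (PvCell.v 0) nb p = PvCell.g
    · by_cases hr : pvHasR n m nb p = true
      · have hstep : pvStepA n m (nb, acc) p = (pvSetP nb p PvCell.r, acc ++ [p]) := by
          simp [pvStepA, hg, hr]
        rw [hstep]
        have hmono := pvMono_setR hOk hs hp hg
        have hcell : pvGet 0 board p = opp := by
          have := hmi p hp
          by_cases hc : pvGet 0 board p = opp
          · exact hc
          · rw [if_neg hc] at this
            rw [this] at hg
            simp at hg
        have hrs1 : pvRS board opp n m (pvSetP nb p PvCell.r) := by
          intro q hq hqr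
          have hqn := pvInb_bounds hq
          by_cases hqp : q = p
          · subst hqp
            obtain ⟨d, hd, hdi, hdr⟩ := pvHasR_iff.mp hr
            exact pvReach.step q (pvAdd q d) d (hrs _ hdi hdr) ⟨hq, hcell⟩ hd rfl
          · rw [pvGet_setP_ne _ _ hOk hs hp hqn.1 hqn.2.2.1 hqp] at hqr
            exact hrs q hq hqr
        exact ih _ _ hOk (pvShp_setP p PvCell.r hs) hsub' (pvMInv_mono hmi hmono) hrs1
      · have hstep : pvStepA n m (nb, acc) p = (nb, acc ++ [p]) := by
          simp [pvStepA, hg, hr]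
        rw [hstep]
        exact ih _ _ hOk hs hsub' hmi hrs
    · have hstep : pvStepA n m (nb, acc) p = (nb, acc) := by
        simp [pvStepA, hg]
      rw [hstep]
      exact ih _ _ hOk hs hsub' hmi hrs

theorem pvRoundA_aux3 {board : List (List Int)} {n m : Nat} :
    ∀ (tc : List (Int × Int)) (nb : List (List PvCell)) (acc : List (Int × Int)),
    pvOk board n m → pvShp board nb → (∀ p ∈ tc, pvInb n m p = true) →
    (∀ x ∈ acc, x ∈ (tc.foldl (pvStepA n m) (nb, acc)).2) ∧
      (∀ p ∈ tc, pvGet (PvCell.v 0) (tc.foldl (pvStepA n m) (nb, acc)).1 p = PvCell.g →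
        p ∈ (tc.foldl (pvStepA n m) (nb, acc)).2) := by
  intro tc
  induction tc with
  | nil => intro nb acc _ _ _; exact ⟨fun x hx => hx, by simp⟩
  | cons p tc ih =>
    intro nb acc hOk hs hsub
    have hp := hsub p (by simp)
    have hpn := pvInb_bounds hp
    have hsub' : ∀ x ∈ tc, pvInb n m x = true := fun x hx => hsub x (by simp [hx])
    simp only [List.foldl_cons]
    by_cases hg : pvGet (PvCell.v 0) nb p = PvCell.g
    · by_cases hr : pvHasR n m nb p = true
      · have hstep : pvStepA n m (nb, acc) p = (pvSetP nb p PvCell.r, acc ++ [p]) := by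
          simp [pvStepA, hg, hr]
        rw [hstep]
        obtain ⟨hacc, hcov⟩ := ih (pvSetP nb p PvCell.r) (acc ++ [p]) hOk
          (pvShp_setP p PvCell.r hs) hsub'
        refine ⟨fun x hx => hacc x (by simp [hx]), ?_⟩
        intro q hq hqg
        rcases (List.mem_cons).mp hq with rfl | hq'
        · exact hacc q (by simp)
        · exact hcov q hq' hqg
      · have hstep : pvStepA n m (nb, acc) p = (nb, acc ++ [p]) := by
          simp [pvStepA, hg, hr]
        rw [hstep]
        obtain ⟨hacc, hcov⟩ := ih nb (acc ++ [p]) hOk hs hsub'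
        refine ⟨fun x hx => hacc x (by simp [hx]), ?_⟩
        intro q hq hqg
        rcases (List.mem_cons).mp hq with rfl | hq'
        · exact hacc q (by simp)
        · exact hcov q hq' hqg
    · have hstep : pvStepA n m (nb, acc) p = (nb, acc) := by
        simp [pvStepA, hg]
      rw [hstep]
      obtain ⟨hacc, hcov⟩ := ih nb acc hOk hs hsub'
      refine ⟨hacc, ?_⟩
      intro q hq hqg
      rcases (List.mem_cons).mp hq with rfl | hq'
      · exfalso
        obtain ⟨_, hrel⟩ := pvRoundA_aux1 tc nb acc hOk hs hsub'
        rcases hrel q hpn.1 hpn.2.2.1 with he | ⟨_, hgg, _⟩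
        · rw [he] at hqg; exact hg hqg
        · exact hg hgg
      · exact hcov q hq' hqg

theorem pvRoundA_aux4 {board : List (List Int)} {n m : Nat} :
    ∀ (tc : List (Int × Int)) (nb : List (List PvCell)) (acc : List (Int × Int)),
    pvOk board n m → pvShp board nb → (∀ p ∈ tc, pvInb n m p = true) →
    (tc.foldl (pvStepA n m) (nb, acc)).1 = nb →
    ∀ p ∈ tc, pvGet (PvCell.v 0) nb p = PvCell.g → pvHasR n m nb p = false := by
  intro tc
  induction tc with
  | nil => intro nb acc _ _ _ _ p hp; simp at hp
  | cons p tc ih =>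
    intro nb acc hOk hs hsub hfix q hq hqg
    have hp := hsub p (by simp)
    have hpn := pvInb_bounds hp
    have hsub' : ∀ x ∈ tc, pvInb n m x = true := fun x hx => hsub x (by simp [hx])
    simp only [List.foldl_cons] at hfix
    by_cases hg : pvGet (PvCell.v 0) nb p = PvCell.g
    · by_cases hr : pvHasR n m nb p = true
      · exfalso
        have hstep : pvStepA n m (nb, acc) p = (pvSetP nb p PvCell.r, acc ++ [p]) := by
          simp [pvStepA, hg, hr]
        rw [hstep] at hfix
        obtain ⟨_, hrel⟩ := pvRoundA_aux1 tc (pvSetP nb p PvCell.r) (acc ++ [p]) hOk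
          (pvShp_setP p PvCell.r hs) hsub'
        have hset : pvGet (PvCell.v 0) (pvSetP nb p PvCell.r) p = PvCell.r :=
          pvGet_setP_self _ _ hOk hs hp
        have hrfin : pvGet (PvCell.v 0) (tc.foldl (pvStepA n m)
            (pvSetP nb p PvCell.r, acc ++ [p])).1 p = PvCell.r := by
          rcases hrel p hpn.1 hpn.2.2.1 with he | ⟨_, _, hrr⟩
          · rw [he, hset]
          · exact hrr
        rw [hfix, hg] at hrfin
        simp at hrfin
      · have hstep : pvStepA n m (nb, acc) p = (nb, acc ++ [p]) := by
          simp [pvStepA, hg, hr]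
        rw [hstep] at hfix
        rcases (List.mem_cons).mp hq with rfl | hq'
        · simpa using hr
        · exact ih nb (acc ++ [p]) hOk hs hsub' hfix q hq' hqg
    · have hstep : pvStepA n m (nb, acc) p = (nb, acc) := by
        simp [pvStepA, hg]
      rw [hstep] at hfix
      rcases (List.mem_cons).mp hq with rfl | hq'
      · exact absurd hqg hg
      · exact ih nb acc hOk hs hsub' hfix q hq' hqg

theorem pvRoundA_aux5 {n m : Nat} :
    ∀ (tc : List (Int × Int)) (nb : List (List PvCell)) (acc : List (Int × Int)),
    ∀ x ∈ (tc.foldl (pvStepA n m) (nb, acc)).2, x ∈ acc ∨ x ∈ tc := by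
  intro tc
  induction tc with
  | nil => intro nb acc x hx; exact Or.inl hx
  | cons p tc ih =>
    intro nb acc x hx
    simp only [List.foldl_cons] at hx
    have hcases : (pvStepA n m (nb, acc) p).2 = acc ∨ (pvStepA n m (nb, acc) p).2 = acc ++ [p] := by
      simp only [pvStepA]
      by_cases hg : pvGet (PvCell.v 0) nb p == PvCell.g <;>
        by_cases hr : pvHasR n m nb p <;> simp [hg, hr]
    have hx' := ih (pvStepA n m (nb, acc) p).1 (pvStepA n m (nb, acc) p).2 x (by
      convert hx)
    rcases hx' with hxa | hxt
    · rcases hcases with he | he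
      · rw [he] at hxa; exact Or.inl hxa
      · rw [he] at hxa
        rcases (List.mem_append).mp hxa with h1 | h2
        · exact Or.inl h1
        · simp at h2; subst h2; exact Or.inr (by simp)
    · exact Or.inr (by simp [hxt])

theorem pvFilter_mono {α : Type} :
    ∀ (l : List α) (f g : α → Bool), (∀ x ∈ l, g x = true → f x = true) →
    (l.filter g).length ≤ (l.filter f).length := by
  intro l
  induction l with
  | nil => intro f g _; simp
  | cons a l ih =>
    intro f g himp
    have ih' := ih f g (fun x hx => himp x (by simp [hx]))
    by_cases hga : g a = true
    · have hfa := himp a (by simp) hga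
      simp only [List.filter_cons, hga, hfa]
      simpa using ih'
    · simp only [List.filter_cons, Bool.not_eq_true] at hga ⊢
      rw [hga]
      by_cases hfa : f a = true
      · rw [hfa]; simp; omega
      · simp only [Bool.not_eq_true] at hfa; rw [hfa]; simpa using ih'

theorem pvFilter_lt {α : Type} :
    ∀ (l : List α) (f g : α → Bool), (∀ x ∈ l, g x = true → f x = true) →
    ∀ x ∈ l, f x = true → g x = false → (l.filter g).length < (l.filter f).length := by
  intro l
  induction l with
  | nil => intro f g _ x hx; simp at hx
  | cons a l ih =>
    intro f g himp x hx hfx hgx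
    have himp' : ∀ y ∈ l, g y = true → f y = true := fun y hy => himp y (by simp [hy])
    rcases (List.mem_cons).mp hx with rfl | hx'
    · simp only [List.filter_cons, hgx, hfx]
      have := pvFilter_mono l f g himp'
      simp
      omega
    · have ihlt := ih f g himp' x hx' hfx hgx
      by_cases hga : g a = true
      · have hfa := himp a (by simp) hga
        simp only [List.filter_cons, hga, hfa]
        simpa using ihlt
      · simp only [Bool.not_eq_true] at hga
        simp only [List.filter_cons, hga]
        by_cases hfa : f a = true
        · rw [hfa]; simp; omega
        · simp only [Bool.not_eq_true] at hfa; rw [hfa]; simpa using ihlt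

def pvGcount (n m : Nat) (nb : List (List PvCell)) : Nat :=
  ((pvGrid n m).filter (fun p => pvGet (PvCell.v 0) nb p == PvCell.g)).length

theorem pvWhileA_main {board : List (List Int)} {opp : Int} {n m : Nat} :
    ∀ (fuel : Nat) (nb : List (List PvCell)) (tc : List (Int × Int)),
    pvOk board n m → pvShp board nb → pvMInv board opp n m nb → pvRS board opp n m nb →
    (∀ p : Int × Int, pvInb n m p = true → pvGet (PvCell.v 0) nb p = PvCell.g → p ∈ tc) →
    (∀ p ∈ tc, pvInb n m p = true) →
    pvGcount n m nb < fuel →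
    pvShp board (pvWhileA n m fuel nb tc) ∧ pvMono nb (pvWhileA n m fuel nb tc) ∧
      pvMInv board opp n m (pvWhileA n m fuel nb tc) ∧
      pvRS board opp n m (pvWhileA n m fuel nb tc) ∧
      (∀ p : Int × Int, pvInb n m p = true →
        pvGet (PvCell.v 0) (pvWhileA n m fuel nb tc) p = PvCell.g →
        pvHasR n m (pvWhileA n m fuel nb tc) p = false) := by
  intro fuel
  induction fuel with
  | zero => intro nb tc _ _ _ _ _ _ hfuel; omega
  | succ f ih =>
    intro nb tc hOk hs hmi hrs hginv htc hfuel
    simp only [pvWhileA]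
    by_cases hemp : tc.isEmpty
    · rw [if_pos hemp]
      refine ⟨hs, pvMono_refl nb, hmi, hrs, ?_⟩
      intro p hp hpg
      exfalso
      have hmem := hginv p hp hpg
      rw [List.isEmpty_iff] at hemp
      rw [hemp] at hmem
      simp at hmem
    · rw [if_neg hemp]
      simp only [pvRoundA_eq]
      obtain ⟨hs1, hrel⟩ := pvRoundA_aux1 (board := board) tc nb [] hOk hs htc
      have hmono1 : pvMono nb (tc.foldl (pvStepA n m) (nb, [])).1 := pvStepRel_mono hrel
      have hmi1 := pvMInv_mono hmi hmono1
      have hrs1 := pvRoundA_aux2 (opp := opp) tc nb [] hOk hs htc hmi hrs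
      obtain ⟨hacc3, hcov3⟩ := pvRoundA_aux3 (board := board) tc nb [] hOk hs htc
      have htc1 : ∀ p ∈ (tc.foldl (pvStepA n m) (nb, [])).2, pvInb n m p = true := by
        intro p hp
        rcases pvRoundA_aux5 tc nb [] p hp with h | h
        · simp at h
        · exact htc p h
      by_cases hfix : nb = (tc.foldl (pvStepA n m) (nb, [])).1
      · rw [if_pos hfix, ← hfix]
        refine ⟨hs, pvMono_refl nb, hmi, hrs, ?_⟩
        intro p hp hpg
        exact pvRoundA_aux4 tc nb [] hOk hs htc hfix.symm p (hginv p hp hpg) hpg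
      · rw [if_neg hfix]
        have hginv1 : ∀ p : Int × Int, pvInb n m p = true →
            pvGet (PvCell.v 0) (tc.foldl (pvStepA n m) (nb, [])).1 p = PvCell.g →
            p ∈ (tc.foldl (pvStepA n m) (nb, [])).2 := by
          intro p hp hpg
          have hpn := pvInb_bounds hp
          have hptc : p ∈ tc := by
            rcases hrel p hpn.1 hpn.2.2.1 with he | ⟨hm, _, hrr⟩
            · exact hginv p hp (he.symm.trans hpg)
            · rw [hpg] at hrr; simp at hrr
          exact hcov3 p hptc hpg
        have hne : ∃ q : Int × Int, 0 ≤ q.1 ∧ 0 ≤ q.2 ∧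
            pvGet (PvCell.v 0) (tc.foldl (pvStepA n m) (nb, [])).1 q ≠ pvGet (PvCell.v 0) nb q := by
          by_contra hno
          apply hfix
          apply pvShp_ext (PvCell.v 0) hs hs1
          intro q h1 h2
          by_contra hne'
          exact hno ⟨q, h1, h2, fun h => hne' h.symm⟩
        obtain ⟨q, hq1, hq2, hqne⟩ := hne
        rcases hrel q hq1 hq2 with he | ⟨hqtc, hqg, hqr⟩
        · exact absurd he hqne
        have hqinb := htc q hqtc
        have hdec : pvGcount n m (tc.foldl (pvStepA n m) (nb, [])).1 < pvGcount n m nb := by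
          apply pvFilter_lt (pvGrid n m)
            (fun p => pvGet (PvCell.v 0) nb p == PvCell.g)
            (fun p => pvGet (PvCell.v 0) (tc.foldl (pvStepA n m) (nb, [])).1 p == PvCell.g)
          · intro x hxg hx
            have hxi := pvGrid_mem.mp hxg
            have hxn := pvInb_bounds hxi
            rcases hrel x hxn.1 hxn.2.2.1 with he | ⟨_, hgg, hrr⟩
            · rw [← he]; exact hx
            · rw [hrr] at hx; simp at hx
          · exact pvGrid_mem.mpr hqinb
          · simp [hqg]
          · simp [hqr]
        obtain ⟨ha, hb, hc, hd, he'⟩ := ih (tc.foldl (pvStepA n m) (nb, [])).1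
          (tc.foldl (pvStepA n m) (nb, [])).2 hOk hs1 hmi1 hrs1 hginv1 htc1 (by omega)
        exact ⟨ha, pvMono_trans hmono1 hb, hc, hd, he'⟩

theorem pvReach_r {board : List (List Int)} {opp : Int} {n m : Nat} {nbF : List (List PvCell)}
    (hmi : pvMInv board opp n m nbF)
    (hclosed : ∀ p : Int × Int, pvInb n m p = true →
      pvGet (PvCell.v 0) nbF p = PvCell.g → pvHasR n m nbF p = false)
    (hlib : ∀ p : Int × Int, pvInb n m p = true → pvGet 0 board p = opp →
      pvHasLib board n m p = true → pvGet (PvCell.v 0) nbF p = PvCell.r) :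
    ∀ p : Int × Int, pvReach board opp n m p → pvGet (PvCell.v 0) nbF p = PvCell.r := by
  intro p h
  induction h with
  | lib p hopp hl => exact hlib p hopp.1 hopp.2 hl
  | step p q d hq hopp hd heq ihq =>
    have hhr : pvHasR n m nbF p = true :=
      pvHasR_iff.mpr ⟨d, hd, by rw [heq]; exact (pvReach_opp hq).1, by rw [heq]; exact ihq⟩
    have hmip := hmi p hopp.1
    rw [if_pos hopp.2] at hmip
    rcases hmip with hr | hg
    · exact hr
    · rw [hclosed p hopp.1 hg] at hhr
      simp at hhr

def pvStepB (oppL : List (Int × Int)) (p : Int × Int)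
    (st : List (Int × Int) × List (Int × Int)) (d : Int × Int) :
    List (Int × Int) × List (Int × Int) :=
  let q := pvAdd p d
  if oppL.contains q && !st.1.contains q then (st.1 ++ [q], st.2 ++ [q]) else st

theorem pvRoundB_eq (oppL : List (Int × Int)) (st : List (Int × Int) × List (Int × Int))
    (ps : List (Int × Int)) :
    pvRoundB oppL st ps = ps.foldl (fun st p => pvDeltas.foldl (pvStepB oppL p) st) st := rfl

theorem pvInnerB (oppL : List (Int × Int)) (p : Int × Int) :
    ∀ (ds : List (Int × Int)) (al acc : List (Int × Int)),
    ∃ L, ds.foldl (pvStepB oppL p) (al, acc) = (al ++ L, acc ++ L) ∧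
      (∀ x ∈ L, x ∈ oppL ∧ ∃ d ∈ ds, x = pvAdd p d) ∧
      (al.Nodup → (al ++ L).Nodup) ∧
      (∀ d ∈ ds, pvAdd p d ∈ oppL → pvAdd p d ∈ al ++ L) := by
  intro ds
  induction ds with
  | nil =>
    intro al acc
    exact ⟨[], by simp, by simp, by simp, by simp⟩
  | cons d ds ih =>
    intro al acc
    simp only [List.foldl_cons]
    by_cases hcond : pvAdd p d ∈ oppL ∧ pvAdd p d ∉ al
    · have hstep : pvStepB oppL p (al, acc) d = (al ++ [pvAdd p d], acc ++ [pvAdd p d]) := by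
        simp only [pvStepB, Bool.and_eq_true, Bool.not_eq_true']
        rw [if_pos]
        constructor
        · exact List.contains_iff_mem.mpr hcond.1
        · rw [← Bool.not_eq_true, List.contains_iff_mem]
          exact hcond.2
      rw [hstep]
      obtain ⟨L', heq, hmem, hnd, hcov⟩ := ih (al ++ [pvAdd p d]) (acc ++ [pvAdd p d])
      refine ⟨[pvAdd p d] ++ L', by rw [heq]; simp, ?_, ?_, ?_⟩
      · intro x hx
        rcases (List.mem_append).mp hx with hx1 | hx2
        · simp at hx1
          subst hx1
          exact ⟨hcond.1, d, by simp, rfl⟩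
        · obtain ⟨ho, d', hd', hxe⟩ := hmem x hx2
          exact ⟨ho, d', by simp [hd'], hxe⟩
      · intro hal
        have : (al ++ [pvAdd p d]).Nodup := by
          rw [List.nodup_append]
          refine ⟨hal, by simp, ?_⟩
          intro a ha b hb
          rw [List.mem_singleton] at hb
          subst hb
          intro hab
          rw [hab] at ha
          exact hcond.2 ha
        have h2 := hnd this
        simpa [List.append_assoc] using h2
      · intro d' hd' ho
        rcases (List.mem_cons).mp hd' with rfl | hd''
        · have : pvAdd p d' ∈ al ++ [pvAdd p d'] := by simp
          have h2 : al ++ [pvAdd p d'] ++ L' = al ++ ([pvAdd p d'] ++ L') := by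
            simp [List.append_assoc]
          rw [← h2]
          exact List.mem_append_left _ this
        · have := hcov d' hd'' ho
          simpa [List.append_assoc] using this
    · have hstep : pvStepB oppL p (al, acc) d = (al, acc) := by
        simp only [pvStepB]
        rw [if_neg]
        intro hc
        rw [Bool.and_eq_true, Bool.not_eq_true', ← Bool.not_eq_true, List.contains_iff_mem] at hc
        exact hcond ⟨hc.1, fun hmem => hc.2 (List.contains_iff_mem.mpr hmem)⟩
      rw [hstep]
      obtain ⟨L', heq, hmem, hnd, hcov⟩ := ih al acc
      refine ⟨L', heq, ?_, hnd, ?_⟩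
      · intro x hx
        obtain ⟨ho, d', hd', hxe⟩ := hmem x hx
        exact ⟨ho, d', by simp [hd'], hxe⟩
      · intro d' hd' ho
        rcases (List.mem_cons).mp hd' with rfl | hd''
        · have hin : pvAdd p d' ∈ al := by
            by_contra hno
            exact hcond ⟨ho, hno⟩
          exact List.mem_append_left _ hin
        · exact hcov d' hd'' ho

theorem pvRoundB_main {board : List (List Int)} {opp : Int} {n m : Nat}
    {oppL : List (Int × Int)} (hoppL : ∀ x, x ∈ oppL → pvOpp board opp n m x) :
    ∀ (ps al acc : List (Int × Int)),
    ∃ L, ps.foldl (fun st p => pvDeltas.foldl (pvStepB oppL p) st) (al, acc) = (al ++ L, acc ++ L) ∧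
      (∀ x ∈ L, x ∈ oppL) ∧
      (al.Nodup → (al ++ L).Nodup) ∧
      (∀ p ∈ ps, ∀ d ∈ pvDeltas, pvAdd p d ∈ oppL → pvAdd p d ∈ al ++ L) ∧
      ((∀ p ∈ ps, pvReach board opp n m p) → (∀ x ∈ L, pvReach board opp n m x)) := by
  intro ps
  induction ps with
  | nil =>
    intro al acc
    exact ⟨[], by simp, by simp, by simp, by simp, by simp⟩
  | cons p ps ih =>
    intro al acc
    simp only [List.foldl_cons]
    obtain ⟨L1, heq1, hmem1, hnd1, hcov1⟩ := pvInnerB oppL p pvDeltas al acc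
    rw [heq1]
    obtain ⟨L2, heq2, hmem2, hnd2, hcov2, hrch2⟩ := ih (al ++ L1) (acc ++ L1)
    refine ⟨L1 ++ L2, by rw [heq2]; simp [List.append_assoc], ?_, ?_, ?_, ?_⟩
    · intro x hx
      rcases (List.mem_append).mp hx with h1 | h2
      · exact (hmem1 x h1).1
      · exact hmem2 x h2
    · intro hal
      have := hnd2 (hnd1 hal)
      simpa [List.append_assoc] using this
    · intro p' hp' d hd ho
      rcases (List.mem_cons).mp hp' with rfl | hp''
      · have := hcov1 d hd ho
        have h2 : pvAdd p' d ∈ (al ++ L1) ++ L2 := List.mem_append_left _ this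
        simpa [List.append_assoc] using h2
      · have := hcov2 p' hp'' d hd ho
        simpa [List.append_assoc] using this
    · intro hrall x hx
      rcases (List.mem_append).mp hx with h1 | h2
      · obtain ⟨ho, d, hd, hxe⟩ := hmem1 x h1
        obtain ⟨d', hd', heqd⟩ := pvDeltas_symm (p := p) hd
        rw [← hxe] at heqd
        exact pvReach.step x p d' (hrall p (by simp)) (hoppL x ho) hd' heqd
      · exact hrch2 (fun p' hp' => hrall p' (by simp [hp'])) x h2

theorem pvBfs_main {board : List (List Int)} {opp : Int} {n m : Nat}
    {oppL : List (Int × Int)} (hoppL : ∀ x, x ∈ oppL → pvOpp board opp n m x) :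
    ∀ (fuel : Nat) (alive frontier : List (Int × Int)),
    (∀ x ∈ frontier, x ∈ alive) → alive.Nodup → (∀ x ∈ alive, x ∈ oppL) →
    (∀ x ∈ alive, pvReach board opp n m x) →
    (∀ p ∈ alive, p ∉ frontier → ∀ d ∈ pvDeltas, pvAdd p d ∈ oppL → pvAdd p d ∈ alive) →
    oppL.length + 2 ≤ alive.length + fuel →
    (∀ x ∈ alive, x ∈ pvBfs oppL fuel alive frontier) ∧
      (∀ x ∈ pvBfs oppL fuel alive frontier, pvReach board opp n m x) ∧
      (∀ p ∈ pvBfs oppL fuel alive frontier, ∀ d ∈ pvDeltas,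
        pvAdd p d ∈ oppL → pvAdd p d ∈ pvBfs oppL fuel alive frontier) := by
  intro fuel
  induction fuel with
  | zero =>
    intro alive frontier _ hnd hsub _ _ hfuel
    exfalso
    have := (List.subperm_of_subset hnd hsub).length_le
    omega
  | succ f ih =>
    intro alive frontier hfr hnd hsub hrch hcl hfuel
    have halen : alive.length ≤ oppL.length := (List.subperm_of_subset hnd hsub).length_le
    simp only [pvBfs]
    by_cases hfe : frontier.isEmpty
    · rw [if_pos hfe]
      rw [List.isEmpty_iff] at hfe
      refine ⟨fun x hx => hx, hrch, ?_⟩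
      intro p hp d hd ho
      exact hcl p hp (by simp [hfe]) d hd ho
    · rw [if_neg hfe]
      simp only [pvRoundB_eq]
      obtain ⟨L, heq, hmemL, hndL, hcovL, hrchL⟩ :=
        pvRoundB_main hoppL frontier alive []
      rw [heq]
      simp only [List.nil_append]
      have hrchL' := hrchL (fun p hp => hrch p (hfr p hp))
      by_cases hL : L = []
      · subst hL
        simp only [List.append_nil]
        cases f with
        | zero => omega
        | succ f' =>
          have hbfs : pvBfs oppL (f' + 1) alive [] = alive := by
            simp [pvBfs]
          rw [hbfs]
          refine ⟨fun x hx => hx, hrch, ?_⟩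
          intro p hp d hd ho
          by_cases hpf : p ∈ frontier
          · have := hcovL p hpf d hd ho
            simpa using this
          · exact hcl p hp hpf d hd ho
      · have hlen : 1 ≤ L.length := by
          cases L with
          | nil => exact absurd rfl hL
          | cons a l => simp
        obtain ⟨hc1, hc2, hc3⟩ := ih (alive ++ L) L
          (fun x hx => List.mem_append_right _ hx)
          (hndL hnd)
          (by
            intro x hx
            rcases (List.mem_append).mp hx with h1 | h2
            · exact hsub x h1
            · exact hmemL x h2)
          (by
            intro x hx
            rcases (List.mem_append).mp hx with h1 | h2
            · exact hrch x h1
            · exact hrchL' x h2)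
          (by
            intro p hp hpL d hd ho
            have hpal : p ∈ alive := by
              rcases (List.mem_append).mp hp with h1 | h2
              · exact h1
              · exact absurd h2 hpL
            by_cases hpf : p ∈ frontier
            · exact hcovL p hpf d hd ho
            · exact List.mem_append_left _ (hcl p hpal hpf d hd ho))
          (by
            rw [List.length_append]
            omega)
        exact ⟨fun x hx => hc1 x (List.mem_append_left _ hx), hc2, hc3⟩

theorem pvOppL_mem {board : List (List Int)} {opp : Int} {n m : Nat} {x : Int × Int} :
    x ∈ pvOppL board opp n m ↔ pvOpp board opp n m x := by
  rw [pvOppL, List.mem_filter, pvOpp]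
  simp [pvGrid_mem]

theorem pvFrontier0_mem {board : List (List Int)} {opp : Int} {n m : Nat} {x : Int × Int} :
    x ∈ pvFrontier0 board opp n m ↔ pvOpp board opp n m x ∧ pvHasLib board n m x = true := by
  rw [pvFrontier0, List.mem_filter, pvOpp]
  simp [pvGrid_mem]
  tauto

theorem pvGet_eq_getElem {α : Type} (d : α) (nb : List (List α)) (i j : Nat)
    (hi : i < nb.length) (hj : j < nb[i].length) :
    pvGet d nb ((i : Int), (j : Int)) = nb[i][j] := by
  simp only [pvGet, Int.toNat_natCast, List.getD_eq_getElem?_getD]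
  rw [List.getElem?_eq_getElem hi]
  simp only [Option.getD_some]
  rw [List.getElem?_eq_getElem hj]
  simp only [Option.getD_some]

theorem pvShp_row_len {α : Type} {board : List (List Int)} {nb : List (List α)}
    (hs : pvShp board nb) (i : Nat) (hi : i < board.length) (hi' : i < nb.length) :
    nb[i].length = board[i].length := by
  have h := hs.2 i
  rw [List.getD_eq_getElem?_getD, List.getElem?_eq_getElem hi',
    List.getD_eq_getElem?_getD, List.getElem?_eq_getElem hi] at h
  simpa using h

theorem pvMainAux (board : List (List Int)) (opp : Int) (n m : Nat)
    (hOk : pvOk board n m) :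
    (pvPhase3 opp n m (pvWhileA n m (n * m + 1)
        (pvPhase1 board opp n m).1 (pvPhase1 board opp n m).2)).map
      (fun row => row.map (fun c => match c with | PvCell.v k => k | _ => 0)) =
    ((pvOppL board opp n m).filter
        (fun p => !(pvBfs (pvOppL board opp n m) ((pvOppL board opp n m).length + 2)
          (pvFrontier0 board opp n m) (pvFrontier0 board opp n m)).contains p)).foldl
      (fun out p => pvSetP out p 0) (board.map (fun row => row)) := by
  -- A-side facts
  have hs0 := pvPhase1_shp board opp n m
  have hget0 := pvPhase1_get board opp n m hOk
  have hmi0 : pvMInv board opp n m (pvPhase1 board opp n m).1 := by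
    intro p hp
    have hpn := pvInb_bounds hp
    rw [hget0 p hpn.1 hpn.2.2.1]
    by_cases hc : pvGet 0 board p = opp
    · rw [if_pos hc, if_pos ⟨hp, hc⟩]
      by_cases hl : pvHasLib board n m p = true
      · rw [if_pos hl]; left; rfl
      · rw [if_neg hl]; right; rfl
    · rw [if_neg hc, if_neg (fun h => hc h.2)]
  have hrs0 : pvRS board opp n m (pvPhase1 board opp n m).1 := by
    intro p hp hpr
    have hpn := pvInb_bounds hp
    rw [hget0 p hpn.1 hpn.2.2.1] at hpr
    by_cases hc : pvInb n m p = true ∧ pvGet 0 board p = opp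
    · rw [if_pos hc] at hpr
      by_cases hl : pvHasLib board n m p = true
      · exact pvReach.lib p ⟨hc.1, hc.2⟩ hl
      · rw [if_neg hl] at hpr; simp at hpr
    · rw [if_neg hc] at hpr; simp at hpr
  have hginv0 : ∀ p : Int × Int, pvInb n m p = true →
      pvGet (PvCell.v 0) (pvPhase1 board opp n m).1 p = PvCell.g →
      p ∈ (pvPhase1 board opp n m).2 := by
    intro p hp hpg
    have hpn := pvInb_bounds hp
    rw [hget0 p hpn.1 hpn.2.2.1] at hpg
    rw [pvPhase1_tc]
    by_cases hc : pvInb n m p = true ∧ pvGet 0 board p = opp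
    · exact pvOppL_mem.mpr ⟨hc.1, hc.2⟩
    · rw [if_neg hc] at hpg; simp at hpg
  have htc0 : ∀ p ∈ (pvPhase1 board opp n m).2, pvInb n m p = true := by
    intro p hp
    rw [pvPhase1_tc] at hp
    exact (pvOppL_mem.mp hp).1
  have hfuel0 : pvGcount n m (pvPhase1 board opp n m).1 < n * m + 1 := by
    have h1 : pvGcount n m (pvPhase1 board opp n m).1 ≤ (pvGrid n m).length :=
      List.length_filter_le _ _
    rw [pvGrid_length] at h1
    omega
  obtain ⟨hsF, hmonoF, hmiF, hrsF, hclF⟩ := pvWhileA_main (n * m + 1)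
    (pvPhase1 board opp n m).1 (pvPhase1 board opp n m).2 hOk hs0 hmi0 hrs0 hginv0 htc0 hfuel0
  have hlibF : ∀ p : Int × Int, pvInb n m p = true → pvGet 0 board p = opp →
      pvHasLib board n m p = true →
      pvGet (PvCell.v 0) (pvWhileA n m (n * m + 1)
        (pvPhase1 board opp n m).1 (pvPhase1 board opp n m).2) p = PvCell.r := by
    intro p hp hc hl
    have hpn := pvInb_bounds hp
    have h1 : pvGet (PvCell.v 0) (pvPhase1 board opp n m).1 p = PvCell.r := by
      rw [hget0 p hpn.1 hpn.2.2.1, if_pos ⟨hp, hc⟩, if_pos hl]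
    rcases hmonoF p hpn.1 hpn.2.2.1 with he | ⟨hg, hr⟩
    · rw [he, h1]
    · exact hr
  have hcompleteF := pvReach_r hmiF hclF hlibF
  -- B-side facts
  have hoppLc : ∀ x, x ∈ pvOppL board opp n m → pvOpp board opp n m x :=
    fun x hx => pvOppL_mem.mp hx
  obtain ⟨hb1, hb2, hb3⟩ := pvBfs_main hoppLc ((pvOppL board opp n m).length + 2)
    (pvFrontier0 board opp n m) (pvFrontier0 board opp n m)
    (fun x hx => hx) ((pvGrid_nodup n m).filter _)
    (fun x hx => pvOppL_mem.mpr (pvFrontier0_mem.mp hx).1)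
    (fun x hx => pvReach.lib x (pvFrontier0_mem.mp hx).1 (pvFrontier0_mem.mp hx).2)
    (fun p hp hnp => absurd hp hnp)
    (by omega)
  have halive_iff : ∀ q : Int × Int,
      q ∈ pvBfs (pvOppL board opp n m) ((pvOppL board opp n m).length + 2)
        (pvFrontier0 board opp n m) (pvFrontier0 board opp n m) ↔
      pvReach board opp n m q := by
    intro q
    constructor
    · exact hb2 q
    · intro h
      induction h with
      | lib p hopp hl => exact hb1 p (pvFrontier0_mem.mpr ⟨hopp, hl⟩)
      | step p q' d hq' hopp hd heq ih =>
        obtain ⟨d', hd', heqd⟩ := pvDeltas_symm (p := p) hd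
        rw [heq] at heqd
        have h3 := hb3 q' ih d' hd' (by rw [heqd]; exact pvOppL_mem.mpr hopp)
        rw [heqd] at h3
        exact h3
  -- the captured list
  have hndzs : ((pvOppL board opp n m).filter
      (fun p => !(pvBfs (pvOppL board opp n m) ((pvOppL board opp n m).length + 2)
        (pvFrontier0 board opp n m) (pvFrontier0 board opp n m)).contains p)).Nodup :=
    ((pvGrid_nodup n m).filter _).filter _
  have hsubzs : ∀ p ∈ (pvOppL board opp n m).filter
      (fun p => !(pvBfs (pvOppL board opp n m) ((pvOppL board opp n m).length + 2)
        (pvFrontier0 board opp n m) (pvFrontier0 board opp n m)).contains p),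
      pvInb n m p = true :=
    fun p hp => (pvOppL_mem.mp (List.mem_of_mem_filter hp)).1
  have hzs_iff : ∀ q : Int × Int,
      q ∈ (pvOppL board opp n m).filter
        (fun p => !(pvBfs (pvOppL board opp n m) ((pvOppL board opp n m).length + 2)
          (pvFrontier0 board opp n m) (pvFrontier0 board opp n m)).contains p) ↔
      (pvOpp board opp n m q ∧ ¬ pvReach board opp n m q) := by
    intro q
    rw [List.mem_filter]
    constructor
    · intro ⟨h1, h2⟩
      refine ⟨pvOppL_mem.mp h1, ?_⟩
      intro hr
      rw [Bool.not_eq_true', ← Bool.not_eq_true, List.contains_iff_mem] at h2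
      exact h2 ((halive_iff q).mpr hr)
    · intro ⟨h1, h2⟩
      refine ⟨pvOppL_mem.mpr h1, ?_⟩
      rw [Bool.not_eq_true', ← Bool.not_eq_true, List.contains_iff_mem]
      exact fun hm => h2 ((halive_iff q).mp hm)
  -- rewrite the B-side fold
  have hzeq : ((pvOppL board opp n m).filter
      (fun p => !(pvBfs (pvOppL board opp n m) ((pvOppL board opp n m).length + 2)
        (pvFrontier0 board opp n m) (pvFrontier0 board opp n m)).contains p)).foldl
      (fun out p => pvSetP out p 0) (board.map (fun row => row)) =
    ((pvOppL board opp n m).filter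
      (fun p => !(pvBfs (pvOppL board opp n m) ((pvOppL board opp n m).length + 2)
        (pvFrontier0 board opp n m) (pvFrontier0 board opp n m)).contains p)).foldl
      (pvUpd (0 : Int) (fun _ _ => some 0)) board := by
    rw [List.map_id']
    rfl
  rw [hzeq]
  have hsB : pvShp board board := ⟨rfl, fun _ => rfl⟩
  have hshp3 := pvPhase3_shp board opp n m _ hsF
  have hshpB := pvUpd_foldl_shp (0 : Int) (fun _ _ => some 0) (board := board)
    ((pvOppL board opp n m).filter
      (fun p => !(pvBfs (pvOppL board opp n m) ((pvOppL board opp n m).length + 2)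
        (pvFrontier0 board opp n m) (pvFrontier0 board opp n m)).contains p)) board hsB
  -- extensional equality
  apply List.ext_getElem
  · simp only [List.length_map]
    rw [hshp3.1, hshpB.1]
  · intro i hiL hiR
    have hi : i < board.length := by
      simp only [List.length_map] at hiL
      rw [hshp3.1] at hiL
      exact hiL
    have hi3 : i < (pvPhase3 opp n m (pvWhileA n m (n * m + 1)
        (pvPhase1 board opp n m).1 (pvPhase1 board opp n m).2)).length := by
      rw [hshp3.1]; exact hi
    have hiB : i < (((pvOppL board opp n m).filter
        (fun p => !(pvBfs (pvOppL board opp n m) ((pvOppL board opp n m).length + 2)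
          (pvFrontier0 board opp n m) (pvFrontier0 board opp n m)).contains p)).foldl
        (pvUpd (0 : Int) (fun _ _ => some 0)) board).length := by
      rw [hshpB.1]; exact hi
    apply List.ext_getElem
    · simp only [List.getElem_map, List.length_map]
      rw [pvShp_row_len hshp3 i hi hi3, pvShp_row_len hshpB i hi hiB]
    · intro j hjL hjR
      have hj : j < board[i].length := by
        simp only [List.getElem_map, List.length_map] at hjL
        rw [pvShp_row_len hshp3 i hi hi3] at hjL
        exact hjL
    -- values
      have hj3 : j < (pvPhase3 opp n m (pvWhileA n m (n * m + 1)
          (pvPhase1 board opp n m).1 (pvPhase1 board opp n m).2))[i].length := by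
        rw [pvShp_row_len hshp3 i hi hi3]; exact hj
      have hjB : j < (((pvOppL board opp n m).filter
          (fun p => !(pvBfs (pvOppL board opp n m) ((pvOppL board opp n m).length + 2)
            (pvFrontier0 board opp n m) (pvFrontier0 board opp n m)).contains p)).foldl
          (pvUpd (0 : Int) (fun _ _ => some 0)) board)[i].length := by
        rw [pvShp_row_len hshpB i hi hiB]; exact hj
      simp only [List.getElem_map]
      rw [← pvGet_eq_getElem (PvCell.v 0) _ i j hi3 hj3,
        ← pvGet_eq_getElem (0 : Int) _ i j hiB hjB]
      have hcellb : pvGet 0 board ((i : Int), (j : Int)) = board[i][j] :=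
        pvGet_eq_getElem 0 board i j hi hj
      have hq1 : (0 : Int) ≤ ((i : Nat) : Int) := Int.natCast_nonneg i
      have hq2 : (0 : Int) ≤ ((j : Nat) : Int) := Int.natCast_nonneg j
      have hval3 := pvPhase3_get board opp n m _ hOk hsF ((i : Int), (j : Int)) hq1 hq2
      have hvalB := pvUpd_foldl_get (0 : Int) (fun _ _ => some 0) _ board hOk hsB
        hndzs hsubzs ((i : Int), (j : Int)) hq1 hq2
      rw [hval3, hvalB]
      by_cases hjm : j < m
      · have hinb : pvInb n m ((i : Int), (j : Int)) = true := by
          have hin : i < n := by rw [hOk.1]; exact hi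
          simp only [pvInb, decide_eq_true_eq]
          refine ⟨by omega, by omega, by omega, by omega⟩
        rw [if_pos hinb]
        by_cases hcell : pvGet 0 board ((i : Int), (j : Int)) = opp
        · have hmiq := hmiF ((i : Int), (j : Int)) hinb
          rw [if_pos hcell] at hmiq
          rcases hmiq with hr | hg
          · have hreach := hrsF ((i : Int), (j : Int)) hinb hr
            have hnzs : ((i : Int), (j : Int)) ∉ (pvOppL board opp n m).filter
                (fun p => !(pvBfs (pvOppL board opp n m) ((pvOppL board opp n m).length + 2)
                  (pvFrontier0 board opp n m) (pvFrontier0 board opp n m)).contains p) := by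
              rw [hzs_iff]
              exact fun h => h.2 hreach
            rw [if_neg hnzs, hr, hcell]
          · have hnreach : ¬ pvReach board opp n m ((i : Int), (j : Int)) := by
              intro h
              rw [hcompleteF _ h] at hg
              simp at hg
            have hzs : ((i : Int), (j : Int)) ∈ (pvOppL board opp n m).filter
                (fun p => !(pvBfs (pvOppL board opp n m) ((pvOppL board opp n m).length + 2)
                  (pvFrontier0 board opp n m) (pvFrontier0 board opp n m)).contains p) :=
              (hzs_iff _).mpr ⟨⟨hinb, hcell⟩, hnreach⟩
            rw [if_pos hzs, hg]
            rfl
        · have hmiq := hmiF ((i : Int), (j : Int)) hinb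
          rw [if_neg hcell] at hmiq
          have hnzs : ((i : Int), (j : Int)) ∉ (pvOppL board opp n m).filter
              (fun p => !(pvBfs (pvOppL board opp n m) ((pvOppL board opp n m).length + 2)
                (pvFrontier0 board opp n m) (pvFrontier0 board opp n m)).contains p) := by
            rw [hzs_iff]
            exact fun h => hcell h.1.2
          rw [if_neg hnzs, hmiq]
      · have hinb : ¬ pvInb n m ((i : Int), (j : Int)) = true := by
          simp only [pvInb, decide_eq_true_eq]
          omega
        rw [if_neg hinb]
        have h0 : pvGet (PvCell.v 0) (pvPhase1 board opp n m).1 ((i : Int), (j : Int)) =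
            PvCell.v (pvGet 0 board ((i : Int), (j : Int))) := by
          rw [hget0 _ hq1 hq2, if_neg (fun h => hinb h.1)]
        have hF : pvGet (PvCell.v 0) (pvWhileA n m (n * m + 1)
            (pvPhase1 board opp n m).1 (pvPhase1 board opp n m).2) ((i : Int), (j : Int)) =
            PvCell.v (pvGet 0 board ((i : Int), (j : Int))) := by
          rcases hmonoF ((i : Int), (j : Int)) hq1 hq2 with he | ⟨hg, _⟩
          · rw [he, h0]
          · rw [h0] at hg; simp at hg
        have hnzs : ((i : Int), (j : Int)) ∉ (pvOppL board opp n m).filter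
            (fun p => !(pvBfs (pvOppL board opp n m) ((pvOppL board opp n m).length + 2)
              (pvFrontier0 board opp n m) (pvFrontier0 board opp n m)).contains p) := by
          rw [hzs_iff]
          exact fun h => hinb h.1.1
        rw [if_neg hnzs, hF]

-- ===== VERDICT (by name: the statement is the Claim_ definition above) =====
theorem removeCapturedPieces_spec : Claim_equal_removeCapturedPieces := by
  intro board opp _ hpre
  unfold Spec_removeCapturedPieces
  have hOk : pvOk board board.length (board.headD []).length := by
    refine ⟨rfl, ?_⟩
    intro i hi
    have hmem : board.getD i [] ∈ board := by
      rw [List.getD_eq_getElem?_getD, List.getElem?_eq_getElem hi]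
      exact List.getElem_mem hi
    exact hpre _ hmem
  simp only [removeCapturedPieces, removeCapturedPieces_alt]
  exact pvMainAux board opp board.length (board.headD []).length hOk
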